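-- pv_equiv track=rewrite | github.com/beasonsoles/IA-Markov-Decision_Problem | main.py | simplify_data
-- ===== SOURCE A (Python) =====
-- def simplify_data(line):
--     """Function that keeps the first letter of the characters in the entered row.
--     Thus, we ease working with the data. It returns two strings: a string with the initial state
--     and the action, and another string with the final state"""
--     action_found = False
--     initial_state_and_action = ""
--     final_state = ""
--     for column in line:
--         # to make the program more general, we will use the boolean action_found to separate each line
--         # in the two strings created above
--         if not action_found:
--             if column == "High":
--                 initial_state_and_action += "H"
--             elif column == "Low":
--                 initial_state_and_action += "L"
--             else:
--                 # self.data_actions.append(column)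
--                 initial_state_and_action += "-" + column
--                 action_found = True
--         else:
--             if column == "High":
--                 final_state += "H"
--             elif column == "Low":
--                 final_state += "L"
--     return initial_state_and_action, final_state
-- ===== SOURCE B (Python) =====
-- def simplify_data(line):
--     abbr = {"High": "H", "Low": "L"}
--     idx = next((i for i, c in enumerate(line) if c not in abbr), None)
--     if idx is None:
--         return "".join(abbr[c] for c in line), ""
--     head = "".join(abbr[c] for c in line[:idx]) + "-" + line[idx]
--     tail = "".join(abbr[c] for c in line[idx + 1:] if c in abbr)
--     return head, tail
-- ===== Notes on version B (the rewrite author's own statement) =====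
-- stated objective: simpler
-- what changed: Replaces A's stateful single loop with an action_found flag by first locating the split index (first non-High/Low entry) and then building each string by a comprehension over the corresponding slice
import Mathlib
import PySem

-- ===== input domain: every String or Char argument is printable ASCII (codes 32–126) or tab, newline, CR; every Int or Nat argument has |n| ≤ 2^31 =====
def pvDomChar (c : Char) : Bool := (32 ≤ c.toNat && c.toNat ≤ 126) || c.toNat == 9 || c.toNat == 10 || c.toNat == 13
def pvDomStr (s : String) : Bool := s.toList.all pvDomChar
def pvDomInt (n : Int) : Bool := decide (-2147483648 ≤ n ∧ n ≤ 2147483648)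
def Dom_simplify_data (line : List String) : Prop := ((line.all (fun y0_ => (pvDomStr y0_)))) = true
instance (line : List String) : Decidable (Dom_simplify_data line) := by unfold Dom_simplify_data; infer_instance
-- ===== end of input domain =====

-- B: computes the split index first, then builds both strings from slices — simpler decomposition, same cost.


-- ===== PORT A =====
-- Literal port of A: one fold over the row carrying (action_found, initial_state_and_action, final_state).
def simplify_data_go (line : List String) (af : Bool) (isa fs : String) : String × String :=
  match line with
  | [] => (isa, fs)
  | column :: rest =>
    if !af then
      if column = "High" then simplify_data_go rest af (isa ++ "H") fs
      else if column = "Low" then simplify_data_go rest af (isa ++ "L") fs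
      else simplify_data_go rest true (isa ++ ("-" ++ column)) fs
    else
      if column = "High" then simplify_data_go rest af isa (fs ++ "H")
      else if column = "Low" then simplify_data_go rest af isa (fs ++ "L")
      else simplify_data_go rest af isa fs

def simplify_data (line : List String) : String × String :=
  simplify_data_go line false "" ""

-- ===== PORT B =====
-- B's structure: find the split index first, then build each string from a slice.
def pvAbbr (c : String) : Option String :=
  if c = "High" then some "H" else if c = "Low" then some "L" else none

-- "".join(abbr[c] for c in xs [if c in abbr])
def pvJoinAbbr (xs : List String) : String :=
  String.join (xs.filterMap pvAbbr)

def simplify_data_alt (line : List String) : String × String :=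
  match line.findIdx? (fun c => (pvAbbr c).isNone) with
  | none => (pvJoinAbbr line, "")
  | some i =>
      (pvJoinAbbr (line.take i) ++ ("-" ++ (line.getD i "")),
       pvJoinAbbr (line.drop (i + 1)))

-- ===== PRECONDITION & SPEC =====
def Spec_simplify_data (line : List String) (out : String × String) : Prop := out = simplify_data_alt line
instance (line : List String) (out : String × String) : Decidable (Spec_simplify_data line out) := by unfold Spec_simplify_data; infer_instance

-- ===== CLAIM (what is proved, stated in full; the proofs are below) =====
def Claim_equal_simplify_data : Prop := ∀ (line : List String), Dom_simplify_data line → Spec_simplify_data line (simplify_data line)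

-- ===== LEMMAS AND PROOFS =====
lemma foldl_append_init (l : List String) (a : String) :
    List.foldl (· ++ ·) a l = a ++ List.foldl (· ++ ·) "" l := by
  induction l generalizing a with
  | nil => simp
  | cons s rest ih =>
    simp only [List.foldl_cons]
    rw [ih (a ++ s), ih ("" ++ s), String.append_assoc]
    simp

lemma join_cons (s : String) (l : List String) :
    String.join (s :: l) = s ++ String.join l := by
  simp [String.join, List.foldl_cons]
  rw [foldl_append_init]

lemma go_true (line : List String) (isa fs : String) :
    simplify_data_go line true isa fs = (isa, fs ++ pvJoinAbbr line) := by
  induction line generalizing fs with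
  | nil => simp [simplify_data_go, pvJoinAbbr, String.join]
  | cons c rest ih =>
    by_cases h1 : c = "High"
    · simp [simplify_data_go, h1, ih, pvJoinAbbr, pvAbbr, join_cons, String.append_assoc]
    · by_cases h2 : c = "Low"
      · simp [simplify_data_go, h1, h2, ih, pvJoinAbbr, pvAbbr, join_cons, String.append_assoc]
      · simp [simplify_data_go, h1, h2, ih, pvJoinAbbr, pvAbbr]

lemma pvAbbr_high : pvAbbr "High" = some "H" := rfl

lemma pvAbbr_low : pvAbbr "Low" = some "L" := rfl

lemma pvAbbr_none {c : String} (h1 : c ≠ "High") (h2 : c ≠ "Low") : pvAbbr c = none := by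
  simp [pvAbbr, h1, h2]

lemma go_false (line : List String) (isa : String) :
    simplify_data_go line false isa "" =
      (match line.findIdx? (fun c => (pvAbbr c).isNone) with
       | none => (isa ++ pvJoinAbbr line, "")
       | some i =>
           (isa ++ (pvJoinAbbr (line.take i) ++ ("-" ++ (line.getD i ""))),
            pvJoinAbbr (line.drop (i + 1)))) := by
  induction line generalizing isa with
  | nil => simp [simplify_data_go, pvJoinAbbr, String.join]
  | cons c rest ih =>
    by_cases h1 : c = "High"
    · subst h1
      rw [simplify_data_go]
      simp only [Bool.not_false, if_true, if_pos rfl, ih, List.findIdx?_cons, pvAbbr_high,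
        Option.isNone_some, Bool.false_eq_true, if_false]
      cases h : rest.findIdx? (fun c => (pvAbbr c).isNone) <;>
        simp [h, pvJoinAbbr, pvAbbr_high, join_cons, String.append_assoc]
    · by_cases h2 : c = "Low"
      · subst h2
        rw [simplify_data_go]
        simp only [Bool.not_false, if_true, h1, if_false, if_pos rfl, ih, List.findIdx?_cons,
          pvAbbr_low, Option.isNone_some, Bool.false_eq_true]
        cases h : rest.findIdx? (fun c => (pvAbbr c).isNone) <;>
          simp [h, pvJoinAbbr, pvAbbr_low, join_cons, String.append_assoc]
      · simp [simplify_data_go, h1, h2, go_true, List.findIdx?_cons, pvAbbr_none h1 h2,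
          pvJoinAbbr, String.join]

-- ===== VERDICT (by name: the statement is the Claim_ definition above) =====
theorem simplify_data_spec : Claim_equal_simplify_data := by
  intro line _
  unfold Spec_simplify_data simplify_data simplify_data_alt
  rw [go_false]
  cases line.findIdx? (fun c => (pvAbbr c).isNone) <;> simp
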